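-- pv_equiv track=rewrite | github.com/NumberzGame/Additional_difficulty | calc.py | human_difficulty_of_sum
-- ===== SOURCE A (Python) =====
-- import collections
--
-- def human_difficulty_of_sum(summands: tuple[int], radix: int = 10, cache_size = 3) -> int:
--
--     cache = collections.deque([], maxlen=cache_size)
--
--     x, y = summands
--
--     if y < x:
--         x, y = y, x
--
--     assert x <= y
--
--     carry = 0
--     retval = 0
--
--     result, multiplier = 0, 1
--
--     while x > 0 or carry > 0:
--         x, r_x = divmod(x, radix)
--         y, r_y = divmod(y, radix)
--
--         tuple_ = (r_x, r_y, carry)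
--
--
--         if tuple_ not in cache:
--             retval += min(r_x, r_y) + carry
--         else:
--             retval += 1
--
--
--         # Extra operation to add the carry.
--         retval += carry
--
--         cache.append(tuple_)
--
--         carry, partial_sum = divmod(r_x + r_y + carry, radix)
--         result += partial_sum*multiplier
--
--
--         # Extra operation to store the carry
--         retval += carry
--
--
--         multiplier *= radix
--
--     result += multiplier * y
--
--     assert result == sum(summands), f'{result=}, {summands=}, {carry=}'
--
--     return retval
-- ===== SOURCE B (Python) =====
-- def human_difficulty_of_sum(summands, radix=10, cache_size=3):
--     x, y = summands
--     if y < x: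
--         x, y = y, x
--     # Pass 1: strip digits with carry, collecting (r_x, r_y, carry_in) triples.
--     triples = []
--     carry = 0
--     while x > 0 or carry > 0:
--         x, r_x = divmod(x, radix)
--         y, r_y = divmod(y, radix)
--         triples.append((r_x, r_y, carry))
--         carry = (r_x + r_y + carry) // radix
--     # Pass 2: score each triple against the window of the previous cache_size triples.
--     retval = 0
--     for i, (r_x, r_y, c_in) in enumerate(triples):
--         window = triples[max(0, i - cache_size):i]
--         retval += 1 if (r_x, r_y, c_in) in window else min(r_x, r_y) + c_in
--         retval += c_in + (r_x + r_y + c_in) // radix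
--     return retval
-- ===== Notes on version B (the rewrite author's own statement) =====
-- stated objective: simpler
-- what changed: One pass with a bounded deque plus a redundant result/multiplier sum re-computation is replaced by two plain passes: collect the (r_x, r_y, carry) digit triples, then score each against a slice of the previous cache_size triples; the deque, the result/multiplier bookkeeping and the asserts disappear.
-- outside the precondition, e.g. on human_difficulty_of_sum((3, 5), -2, 3): A returns 4, B returns 4
import Mathlib
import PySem

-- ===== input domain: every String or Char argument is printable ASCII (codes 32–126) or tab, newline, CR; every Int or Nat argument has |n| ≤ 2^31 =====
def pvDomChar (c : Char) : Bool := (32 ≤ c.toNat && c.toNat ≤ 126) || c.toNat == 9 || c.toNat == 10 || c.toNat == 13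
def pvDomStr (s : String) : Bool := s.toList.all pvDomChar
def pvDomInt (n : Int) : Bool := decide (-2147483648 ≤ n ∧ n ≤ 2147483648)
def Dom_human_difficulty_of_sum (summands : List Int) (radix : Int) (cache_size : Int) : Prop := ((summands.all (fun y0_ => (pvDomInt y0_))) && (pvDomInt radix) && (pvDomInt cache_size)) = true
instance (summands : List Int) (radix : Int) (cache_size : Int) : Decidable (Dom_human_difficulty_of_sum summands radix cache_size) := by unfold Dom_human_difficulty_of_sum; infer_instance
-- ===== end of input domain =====

-- B replaces A's one pass with a bounded deque (plus the redundant result/multiplier sum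
-- re-computation feeding the assert) by two plain passes: collect the digit triples, then
-- score each against a slice window of the previous cache_size triples. Objective: simpler.

-- ===== PORT A =====
-- collections.deque(maxlen=cs).append: keep the last cs elements
def pvDequeAdd (cs : Int) (cache : List (Int × Int × Int)) (t : Int × Int × Int) :
    List (Int × Int × Int) :=
  let c := cache ++ [t]
  c.drop (c.length - cs.toNat)

-- the while-loop of A; fuel 40 covers every input admitted by Dom ∧ Pre (|summand| ≤ 2^31,
-- radix ≥ 2 needs ≤ 33 iterations; with a zero minimum the guard is false at once)
def pvLoopA (fuel : Nat) (radix cs : Int) (x y carry retval result multiplier : Int)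
    (cache : List (Int × Int × Int)) : Int :=
  match fuel with
  | 0 => retval
  | f + 1 =>
    if x > 0 ∨ carry > 0 then
      let x' := PySem.Int.floordiv x radix
      let r_x := PySem.Int.mod x radix
      let y' := PySem.Int.floordiv y radix
      let r_y := PySem.Int.mod y radix
      let t := (r_x, r_y, carry)
      let retval1 := if t ∉ cache then retval + (min r_x r_y + carry) else retval + 1
      -- extra operation to add the carry
      let retval2 := retval1 + carry
      let cache' := pvDequeAdd cs cache t
      let carry' := PySem.Int.floordiv (r_x + r_y + carry) radix
      let partial_sum := PySem.Int.mod (r_x + r_y + carry) radix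
      let result' := result + partial_sum * multiplier
      -- extra operation to store the carry
      let retval3 := retval2 + carry'
      pvLoopA f radix cs x' y' carry' retval3 result' (multiplier * radix) cache'
    else retval

def human_difficulty_of_sum (summands : List Int) (radix : Int) (cache_size : Int) : Int :=
  match summands with
  | [a, b] =>
    let x := if b < a then b else a
    let y := if b < a then a else b
    pvLoopA 40 radix cache_size x y 0 0 0 1 []
  | _ => 0  -- Python raises ValueError on unpacking; outside Pre_

-- ===== PORT B =====
-- pass 1 of Source B: collect the (r_x, r_y, carry_in) triples (same fuel bound as port A)
def pvPass1 (fuel : Nat) (radix : Int) (x y carry : Int) : List (Int × Int × Int) :=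
  match fuel with
  | 0 => []
  | f + 1 =>
    if x > 0 ∨ carry > 0 then
      let x' := PySem.Int.floordiv x radix
      let r_x := PySem.Int.mod x radix
      let y' := PySem.Int.floordiv y radix
      let r_y := PySem.Int.mod y radix
      (r_x, r_y, carry) :: pvPass1 f radix x' y' (PySem.Int.floordiv (r_x + r_y + carry) radix)
    else []

-- the body of Source B's for-loop: score triple p.2 (at index p.1) against its slice window
def pvStep (triples : List (Int × Int × Int)) (radix cache_size : Int)
    (retval : Int) (p : Int × (Int × Int × Int)) : Int :=
  let window := PySem.List.slice triples (some (max 0 (p.1 - cache_size))) (some p.1)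
  retval + (if (p.2.1, p.2.2.1, p.2.2.2) ∈ window then 1 else min p.2.1 p.2.2.1 + p.2.2.2)
    + p.2.2.2 + PySem.Int.floordiv (p.2.1 + p.2.2.1 + p.2.2.2) radix

def human_difficulty_of_sum_alt (summands : List Int) (radix : Int) (cache_size : Int) : Int :=
  if summands.length = 2 then
    let a := summands.getD 0 0
    let b := summands.getD 1 0
    let x := if b < a then b else a
    let y := if b < a then a else b
    let triples := pvPass1 40 radix x y 0
    (PySem.List.enumerate triples 0).foldl (pvStep triples radix cache_size) 0
  else 0  -- Python raises ValueError on unpacking; outside Pre_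

-- ===== PRECONDITION & SPEC =====
-- Pre_ excludes: summands that are not a pair, a negative summand, or a negative cache_size
-- (A raises ValueError / AssertionError there), and radix < 2 with both summands positive,
-- a region on which A diverges (radix = 1), raises ZeroDivisionError (radix = 0) or
-- AssertionError, yet accidentally returns for some negative radixes (the returning part has
-- no closed form); B agrees with A on the cited returning example.
def Pre_human_difficulty_of_sum (summands : List Int) (radix : Int) (cache_size : Int) : Prop :=
  summands.length = 2 ∧ 0 ≤ summands.getD 0 0 ∧ 0 ≤ summands.getD 1 0 ∧ 0 ≤ cache_size ∧
    (2 ≤ radix ∨ summands.getD 0 0 = 0 ∨ summands.getD 1 0 = 0)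
instance (summands : List Int) (radix : Int) (cache_size : Int) : Decidable (Pre_human_difficulty_of_sum summands radix cache_size) := by unfold Pre_human_difficulty_of_sum; infer_instance

def pvWitness_human_difficulty_of_sum : List Int × Int × Int := ([3, 5], 10, 3)

def Spec_human_difficulty_of_sum (summands : List Int) (radix : Int) (cache_size : Int) (out : Int) : Prop := out = human_difficulty_of_sum_alt summands radix cache_size
instance (summands : List Int) (radix : Int) (cache_size : Int) (out : Int) : Decidable (Spec_human_difficulty_of_sum summands radix cache_size out) := by unfold Spec_human_difficulty_of_sum; infer_instance

-- ===== CLAIM (what is proved, stated in full; the proofs are below) =====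
def Claim_equal_human_difficulty_of_sum : Prop := ∀ (summands : List Int) (radix : Int) (cache_size : Int), Dom_human_difficulty_of_sum summands radix cache_size → Pre_human_difficulty_of_sum summands radix cache_size → Spec_human_difficulty_of_sum summands radix cache_size (human_difficulty_of_sum summands radix cache_size)

-- ===== LEMMAS AND PROOFS =====

-- the per-triple score of the tail ts, started with deque state cache
def pvScore (radix cs : Int) (cache : List (Int × Int × Int)) :
    List (Int × Int × Int) → Int
  | [] => 0
  | t :: ts =>
    (if t ∉ cache then min t.1 t.2.1 + t.2.2 else 1) + t.2.2
      + PySem.Int.floordiv (t.1 + t.2.1 + t.2.2) radix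
      + pvScore radix cs (pvDequeAdd cs cache t) ts

theorem pvLoopA_eq_score (fuel : Nat) (radix cs : Int) :
    ∀ (x y carry retval result multiplier : Int) (cache : List (Int × Int × Int)),
      pvLoopA fuel radix cs x y carry retval result multiplier cache
        = retval + pvScore radix cs cache (pvPass1 fuel radix x y carry) := by
  induction fuel with
  | zero => intro x y carry retval result multiplier cache; simp [pvLoopA, pvPass1, pvScore]
  | succ f ih =>
    intro x y carry retval result multiplier cache
    simp only [pvLoopA, pvPass1]
    by_cases h : x > 0 ∨ carry > 0
    · simp only [if_pos h, ih, pvScore]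
      by_cases hm : (PySem.Int.mod x radix, PySem.Int.mod y radix, carry) ∈ cache
      · simp [hm]; ring
      · simp [hm]; ring
    · simp [if_neg h, pvScore]

theorem pvWindow_eq (ts : List (Int × Int × Int)) (cs : Int) (hcs : 0 ≤ cs) (pre : List (Int × Int × Int)) :
    PySem.List.slice ts (some (max 0 ((pre.length : Int) - cs))) (some (pre.length : Int))
      = (ts.take pre.length).drop (pre.length - cs.toNat) := by
  rw [PySem.List.slice_toNat _ (by omega) (by omega)]
  rw [List.drop_take]
  congr 1
  · omega
  · congr 1; omega

theorem pvDequeAdd_prefix (cs : Int) (pre : List (Int × Int × Int)) (t : Int × Int × Int) :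
    (pre ++ [t]).drop (pre.length + 1 - cs.toNat)
      = pvDequeAdd cs (pre.drop (pre.length - cs.toNat)) t := by
  unfold pvDequeAdd
  have h1 : pre.drop (pre.length - cs.toNat) ++ [t]
      = (pre ++ [t]).drop (pre.length - cs.toNat) :=
    (List.drop_append_of_le_length (by omega)).symm
  simp only [h1, List.drop_drop]
  congr 1
  simp only [List.length_drop, List.length_append, List.length_cons, List.length_nil]
  omega

theorem pvFoldl_eq_score (full : List (Int × Int × Int)) (radix cs : Int) (hcs : 0 ≤ cs) :
    ∀ (ts pre : List (Int × Int × Int)), full = pre ++ ts → ∀ (acc : Int),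
      (PySem.List.enumerate ts (pre.length : Int)).foldl (pvStep full radix cs) acc
        = acc + pvScore radix cs (pre.drop (pre.length - cs.toNat)) ts := by
  intro ts
  induction ts with
  | nil => intro pre _ acc; simp [PySem.List.enumerate, pvScore]
  | cons t ts ih =>
    intro pre hfull acc
    have htake : full.take pre.length = pre := by
      rw [hfull, List.take_append_of_le_length (le_refl _), List.take_length]
    have hwin := pvWindow_eq full cs hcs pre
    have hstep := ih (pre ++ [t]) (by simp [hfull])
    simp only [List.length_append, List.length_cons, List.length_nil, Nat.zero_add,
      Nat.cast_add, Nat.cast_one, pvDequeAdd_prefix] at hstep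
    rw [PySem.List.enumerate_cons, List.foldl_cons, hstep]
    simp only [pvStep, pvScore]
    rw [hwin, htake]
    by_cases hm : t ∈ pre.drop (pre.length - cs.toNat)
    · simp [hm]; ring
    · simp [hm]; ring

theorem human_difficulty_of_sum_spec : Claim_equal_human_difficulty_of_sum := by
  intro summands radix cache_size _hdom hpre
  unfold Spec_human_difficulty_of_sum
  obtain ⟨hlen, -, -, hcs, -⟩ := hpre
  match summands with
  | [a, b] =>
    unfold human_difficulty_of_sum human_difficulty_of_sum_alt
    norm_num [List.getD_cons_zero, List.getD_cons_succ]
    rw [pvLoopA_eq_score]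
    have h := pvFoldl_eq_score
      (pvPass1 40 radix (if b < a then b else a) (if b < a then a else b) 0)
      radix cache_size hcs
      (pvPass1 40 radix (if b < a then b else a) (if b < a then a else b) 0) [] rfl 0
    simp only [List.length_nil, Nat.cast_zero, List.drop_nil] at h
    rw [h]
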